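-- pv_equiv track=rewrite | github.com/leosaquetto/totodile | modules/academia.py | descobrir_proximo_treino
-- ===== SOURCE A (Python) =====
-- def descobrir_proximo_treino(registros):
--     """
--     Tradução do findOldestWorkout().
--     Acha o treino que foi feito há mais tempo baseado na letra (A1, B2, etc).
--     """
--     mapa_ultimos = {}
--
--     for r in registros:
--         # Pega só a chave curta antes do parênteses. Ex: "A1 (Peito..." -> "A1"
--         chave_curta = r["treino"].split("(")[0].strip()
--
--         if chave_curta not in mapa_ultimos or r["data"] > mapa_ultimos[chave_curta]["data"]:
--             mapa_ultimos[chave_curta] = r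
--
--     if not mapa_ultimos:
--         return None
--
--     # Pega o que tem a data mais antiga entre os últimos feitos
--     treino_mais_antigo = min(mapa_ultimos.values(), key=lambda x: x["data"])
--     return treino_mais_antigo["treino"]
-- ===== SOURCE B (Python) =====
-- def descobrir_proximo_treino(registros):
--     # Group every record under its short key, then reduce: max per group, min over groups.
--     mapa = {}
--     for r in registros:
--         chave = r["treino"].split("(")[0].strip()
--         mapa.setdefault(chave, []).append(r)
--     if not mapa:
--         return None
--     mais_antigo = min((max(g, key=lambda x: x["data"]) for g in mapa.values()),
--                       key=lambda x: x["data"])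
--     return mais_antigo["treino"]
-- ===== Notes on version B (the rewrite author's own statement) =====
-- stated objective: alternative
-- what changed: A maintains the per-key best record in one comparison-carrying pass; B first groups all records per short key with setdefault(...).append and then reduces with max per group and min over the groups.
import Mathlib
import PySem

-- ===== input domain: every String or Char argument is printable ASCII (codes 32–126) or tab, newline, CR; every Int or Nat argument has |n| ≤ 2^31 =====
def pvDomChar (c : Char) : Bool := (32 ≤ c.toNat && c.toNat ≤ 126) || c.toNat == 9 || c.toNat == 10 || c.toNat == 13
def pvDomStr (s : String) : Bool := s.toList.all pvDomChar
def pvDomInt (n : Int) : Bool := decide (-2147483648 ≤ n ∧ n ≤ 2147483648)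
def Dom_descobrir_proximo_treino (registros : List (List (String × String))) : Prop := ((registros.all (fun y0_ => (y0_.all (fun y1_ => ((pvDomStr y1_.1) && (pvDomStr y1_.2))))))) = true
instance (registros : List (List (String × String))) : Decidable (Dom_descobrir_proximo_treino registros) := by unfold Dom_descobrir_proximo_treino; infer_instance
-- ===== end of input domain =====

-- B replaces A's maintain-the-best single pass by a group-then-reduce decomposition
-- (dict of per-key groups, then max per group and min over the groups); same cost, alternative structure.


-- shared record accessors (a Python dict record is an assoc list; r[k] = first match).
-- pvGetItem is exact whenever the key is present — Pre_ excludes the KeyError case.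
def pvGetItem (r : List (String × String)) (k : String) : String :=
  (((r.find? (fun p => p.1 == k)).map (·.2)).getD "")

def pvData (r : List (String × String)) : String := pvGetItem r "data"

-- r["treino"].split("(")[0].strip(): split? with a nonempty separator is always `some`
-- and its result is always nonempty, so the getD/headD defaults are never reached.
def pvChave (r : List (String × String)) : String :=
  PySem.Str.strip ((((PySem.Str.split? (pvGetItem r "treino") "(")).getD []).headD "")

-- ===== PORT A =====
def descobrir_proximo_treino (registros : List (List (String × String))) : Option String :=
  let mapa_ultimos := registros.foldl (fun m r =>
    let chave_curta := pvChave r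
    match m.get? chave_curta with
    | none => m.insert chave_curta r
    | some prev => if pvData prev < pvData r then m.insert chave_curta r else m)
    PySem.Dict.empty
  if mapa_ultimos.items.isEmpty then none
  else (PySem.List.min? mapa_ultimos.values pvData).map (fun t => pvGetItem t "treino")

-- ===== PORT B =====
def descobrir_proximo_treino_alt (registros : List (List (String × String))) : Option String :=
  let mapa := registros.foldl (fun d r => d.modify (pvChave r) [] (· ++ [r]))
    PySem.Dict.empty
  if mapa.items.isEmpty then none
  else
    (PySem.List.min? (mapa.values.filterMap (fun g => PySem.List.max? g pvData)) pvData).map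
      (fun t => pvGetItem t "treino")

-- ===== PRECONDITION & SPEC =====
-- Pre_ excludes exactly the inputs where the Python A raises KeyError:
-- some record lacking the key "treino" or the key "data".
def Pre_descobrir_proximo_treino (registros : List (List (String × String))) : Prop :=
  (registros.all (fun r => r.any (fun p => p.1 == "treino") && r.any (fun p => p.1 == "data"))) = true
instance (registros : List (List (String × String))) : Decidable (Pre_descobrir_proximo_treino registros) := by unfold Pre_descobrir_proximo_treino; infer_instance

def pvWitness_descobrir_proximo_treino : (List (List (String × String))) :=
  [[("treino", "A1 (Peito)"), ("data", "2024-01-02")], [("treino", "B2"), ("data", "2024-01-01")]]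

def Spec_descobrir_proximo_treino (registros : List (List (String × String))) (out : Option String) : Prop := out = descobrir_proximo_treino_alt registros
instance (registros : List (List (String × String))) (out : Option String) : Decidable (Spec_descobrir_proximo_treino registros out) := by unfold Spec_descobrir_proximo_treino; infer_instance

-- ===== CLAIM (what is proved, stated in full; the proofs are below) =====
def Claim_equal_descobrir_proximo_treino : Prop := ∀ (registros : List (List (String × String))), Dom_descobrir_proximo_treino registros → Pre_descobrir_proximo_treino registros → Spec_descobrir_proximo_treino registros (descobrir_proximo_treino registros)

-- ===== LEMMAS AND PROOFS =====

-- A's loop step and B's loop step, named for the proofs.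
def pvStepA (m : PySem.Dict String (List (String × String))) (r : List (String × String)) :
    PySem.Dict String (List (String × String)) :=
  let chave_curta := pvChave r
  match m.get? chave_curta with
  | none => m.insert chave_curta r
  | some prev => if pvData prev < pvData r then m.insert chave_curta r else m

def pvStepB (d : PySem.Dict String (List (List (String × String)))) (r : List (String × String)) :
    PySem.Dict String (List (List (String × String))) :=
  d.modify (pvChave r) [] (· ++ [r])

-- Invariant tying A's dict (best record per key) to B's dict (group per key).
def pvInv (m : PySem.Dict String (List (String × String)))
    (d : PySem.Dict String (List (List (String × String)))) : Prop :=
  m.keys = d.keys ∧ m.keys.Nodup ∧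
  ∀ c, c ∈ d.keys → PySem.List.max? (d.getD c []) pvData = m.get? c

theorem pvMax?_append_singleton {α : Type} (g : List α) (r : α) (key : α → String) :
    PySem.List.max? (g ++ [r]) key =
      match PySem.List.max? g key with
      | none => some r
      | some m => if key m < key r then some r else some m := by
  unfold PySem.List.max?
  rw [List.foldl_append]
  simp only [List.foldl_cons, List.foldl_nil]
  rcases List.foldl (fun acc x =>
      match acc with
      | none => some x
      | some m => if key m < key x then some x else some m) none g with _ | m <;> rfl

set_option maxHeartbeats 1000000 in
theorem pvInv_step (m : PySem.Dict String (List (String × String)))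
    (d : PySem.Dict String (List (List (String × String))))
    (r : List (String × String)) (h : pvInv m d) : pvInv (pvStepA m r) (pvStepB d r) := by
  obtain ⟨hk, hnd, hg⟩ := h
  by_cases hmem : pvChave r ∈ d.keys
  · -- key already present: A keeps the strict max, B appends to the group
    have hmemm : pvChave r ∈ m.keys := hk ▸ hmem
    obtain ⟨prev, hprev⟩ : ∃ prev, m.get? (pvChave r) = some prev := by
      rcases ho : m.get? (pvChave r) with _ | prev
      · exact absurd ((PySem.Dict.get?_eq_none_iff_not_mem_keys m _).mp ho) (by simpa using hmemm)
      · exact ⟨prev, rfl⟩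
    have hcont : d.contains (pvChave r) = true := by
      simp [PySem.Dict.contains_eq_decide_mem_keys, hmem]
    have hcontm : m.contains (pvChave r) = true := by
      simp [PySem.Dict.contains_eq_decide_mem_keys, hmemm]
    have hkeysB : (pvStepB d r).keys = d.keys := by
      simp [pvStepB, PySem.Dict.keys_modify, PySem.Dict.keys_insert_of_contains _ _ hcont]
    refine ⟨?_, ?_, ?_⟩
    · simp only [pvStepA, hprev]
      split
      · rw [PySem.Dict.keys_insert_of_contains _ _ hcontm, hkeysB, hk]
      · rw [hkeysB, hk]
    · simp only [pvStepA, hprev]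
      split
      · rw [PySem.Dict.keys_insert_of_contains _ _ hcontm]; exact hnd
      · exact hnd
    · intro c hc
      rw [hkeysB] at hc
      by_cases hce : c = pvChave r
      · subst hce
        have hD : (pvStepB d r).getD (pvChave r) [] = d.getD (pvChave r) [] ++ [r] :=
          PySem.Dict.getD_modify_self d (pvChave r) [] (· ++ [r])
        rw [hD, pvMax?_append_singleton, hg (pvChave r) hc, hprev]
        simp only [pvStepA, hprev]
        split
        · next hlt => simp [PySem.Dict.get?_insert_self]
        · next hlt => simp [hprev]
      · have hD : (pvStepB d r).getD c [] = d.getD c [] :=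
          PySem.Dict.getD_modify_of_ne d [] (· ++ [r]) hce
        rw [hD]
        have : (pvStepA m r).get? c = m.get? c := by
          simp only [pvStepA, hprev]
          split
          · exact PySem.Dict.get?_insert_of_ne _ _ hce
          · rfl
        rw [this]; exact hg c hc
  · -- fresh key: A inserts r, B starts the group [r]
    have hmemm : pvChave r ∉ m.keys := hk ▸ hmem
    have hnone : m.get? (pvChave r) = none :=
      (PySem.Dict.get?_eq_none_iff_not_mem_keys m _).mpr hmemm
    have hcont : d.contains (pvChave r) = false := by
      simp [PySem.Dict.contains_eq_decide_mem_keys, hmem]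
    have hcontm : m.contains (pvChave r) = false := by
      simp [PySem.Dict.contains_eq_decide_mem_keys, hmemm]
    have hdD : d.getD (pvChave r) [] = [] := PySem.Dict.getD_of_not_contains _ _ hcont
    have hkeysB : (pvStepB d r).keys = d.keys ++ [pvChave r] := by
      simp [pvStepB, PySem.Dict.keys_modify, PySem.Dict.keys_insert_of_not_contains _ _ hcont]
    have hkeysA : (pvStepA m r).keys = m.keys ++ [pvChave r] := by
      simp only [pvStepA, hnone]
      exact PySem.Dict.keys_insert_of_not_contains _ _ hcontm
    refine ⟨?_, ?_, ?_⟩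
    · rw [hkeysA, hkeysB, hk]
    · rw [hkeysA]
      rw [List.nodup_append]
      refine ⟨hnd, List.nodup_singleton _, ?_⟩
      intro a ha b hb
      rcases List.mem_singleton.mp hb
      exact fun e => hmemm (e ▸ ha)
    · intro c hc
      by_cases hce : c = pvChave r
      · subst hce
        have hD : (pvStepB d r).getD (pvChave r) [] = d.getD (pvChave r) [] ++ [r] :=
          PySem.Dict.getD_modify_self d (pvChave r) [] (· ++ [r])
        rw [hD, hdD]
        simp only [pvStepA, hnone, PySem.Dict.get?_insert_self]
        simp [PySem.List.max?]
      · have hD : (pvStepB d r).getD c [] = d.getD c [] :=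
          PySem.Dict.getD_modify_of_ne d [] (· ++ [r]) hce
        rw [hD]
        rw [hkeysB] at hc
        have hc' : c ∈ d.keys := by
          rcases List.mem_append.mp hc with h | h
          · exact h
          · exact absurd (List.mem_singleton.mp h) hce
        have : (pvStepA m r).get? c = m.get? c := by
          simp only [pvStepA, hnone]
          exact PySem.Dict.get?_insert_of_ne _ _ hce
        rw [this]; exact hg c hc'

theorem pvInv_foldl (l : List (List (String × String)))
    (m : PySem.Dict String (List (String × String)))
    (d : PySem.Dict String (List (List (String × String))))
    (h : pvInv m d) : pvInv (l.foldl pvStepA m) (l.foldl pvStepB d) := by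
  induction l generalizing m d with
  | nil => exact h
  | cons r t ih => exact ih _ _ (pvInv_step m d r h)

-- filterMap over a list on which f is pointwise `some` is a map
theorem pvFilterMap_eq_map {α β : Type} (l : List α) (f : α → Option β) (g : α → β)
    (h : ∀ c ∈ l, f c = some (g c)) : l.filterMap f = l.map g := by
  induction l with
  | nil => rfl
  | cons x t ih =>
    simp [h x (List.mem_cons_self), ih (fun c hc => h c (List.mem_cons_of_mem x hc))]

-- ===== VERDICT (by name: the statement is the Claim_ definition above) =====
theorem descobrir_proximo_treino_spec : Claim_equal_descobrir_proximo_treino := by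
  intro registros _ _
  unfold Spec_descobrir_proximo_treino descobrir_proximo_treino descobrir_proximo_treino_alt
  have hinv : pvInv (registros.foldl pvStepA PySem.Dict.empty)
      (registros.foldl pvStepB PySem.Dict.empty) :=
    pvInv_foldl registros _ _ ⟨by simp [PySem.Dict.keys_empty], by simp [PySem.Dict.keys_empty],
      by intro c hc; simp [PySem.Dict.keys_empty] at hc⟩
  set mA := registros.foldl pvStepA PySem.Dict.empty with hmA
  set dB := registros.foldl pvStepB PySem.Dict.empty with hdB
  obtain ⟨hk, hnd, hg⟩ := hinv
  have hndB : dB.keys.Nodup := hk ▸ hnd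
  -- the ports' folds are literally pvStepA / pvStepB folds (definitional)
  show (if mA.items.isEmpty then none
      else (PySem.List.min? mA.values pvData).map (fun t => pvGetItem t "treino")) =
    (if dB.items.isEmpty then none
      else (PySem.List.min? (dB.values.filterMap (fun g => PySem.List.max? g pvData)) pvData).map
        (fun t => pvGetItem t "treino"))
  -- emptiness of items ↔ emptiness of keys, equal on both sides
  have hkeysitems : ∀ {κ ν : Type} [BEq κ] (d : PySem.Dict κ ν), d.keys = d.items.map (·.1) := by
    intro κ ν _ d; simp [PySem.Dict.keys]
  have hempty : mA.items.isEmpty = dB.items.isEmpty := by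
    have h1 : mA.keys.isEmpty = mA.items.isEmpty := by rw [hkeysitems mA]; exact List.isEmpty_map
    have h2 : dB.keys.isEmpty = dB.items.isEmpty := by rw [hkeysitems dB]; exact List.isEmpty_map
    rw [← h1, ← h2, hk]
  rw [hempty]
  rcases hB : dB.items.isEmpty with _ | _
  · -- nonempty: the two min? arguments are the SAME list
    simp only [Bool.false_eq_true, if_false]
    have hvA : mA.values = mA.keys.map (fun c => mA.getD c []) := by
      rw [show mA.values = mA.items.map (·.2) from by simp [PySem.Dict.values],
        PySem.Dict.items_eq_map_keys mA hnd ([] : List (String × String)), List.map_map]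
      rfl
    have hvB : dB.values = dB.keys.map (fun c => dB.getD c []) := by
      rw [show dB.values = dB.items.map (·.2) from by simp [PySem.Dict.values],
        PySem.Dict.items_eq_map_keys dB hndB ([] : List (List (String × String))), List.map_map]
      rfl
    have hlist : dB.values.filterMap (fun g => PySem.List.max? g pvData) =
        mA.keys.map (fun c => mA.getD c []) := by
      rw [hvB, List.filterMap_map, ← hk]
      apply pvFilterMap_eq_map
      intro c hc
      have h1 : PySem.List.max? (dB.getD c []) pvData = mA.get? c := hg c (hk ▸ hc)
      have h2 : mA.get? c = some (mA.getD c []) := by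
        rcases ho : mA.get? c with _ | v
        · exact absurd ((PySem.Dict.get?_eq_none_iff_not_mem_keys mA _).mp ho) (by simpa using hc)
        · rw [PySem.Dict.getD_eq_get?_getD, ho]; rfl
      simp only [Function.comp]
      rw [h1, h2]
    rw [hlist, ← hvA]
  · simp
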